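-- pv_equiv track=rewrite | github.com/krish-data/DT-Daily-Reflection-Tree | agent.py | dominant
-- ===== SOURCE A (Python) =====
-- def dominant(counts):
--     result = {}
--     for axis, d in counts.items():
--         if not d:
--             result[axis] = "mixed"
--             continue
--         items = sorted(d.items(), key=lambda x: x[1], reverse=True)
--         if len(items) == 1 or items[0][1] > items[1][1]:
--             result[axis] = items[0][0]
--         else:
--             result[axis] = "mixed"
--     return result
-- ===== SOURCE B (Python) =====
-- def dominant(counts):
--     result = {}
--     for axis, d in counts.items():
--         best = None  # (key, value, how many entries reach value)
--         for k, v in d.items():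
--             if best is None or v > best[1]:
--                 best = (k, v, 1)
--             elif v == best[1]:
--                 best = (best[0], best[1], best[2] + 1)
--         if best is not None and best[2] == 1:
--             result[axis] = best[0]
--         else:
--             result[axis] = "mixed"
--     return result
-- ===== Notes on version B (the rewrite author's own statement) =====
-- stated objective: alternative
-- what changed: Replaced the per-axis sort of the value dict by a single pass that tracks the maximum value, the first key reaching it and how many entries reach it.
import Mathlib
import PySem

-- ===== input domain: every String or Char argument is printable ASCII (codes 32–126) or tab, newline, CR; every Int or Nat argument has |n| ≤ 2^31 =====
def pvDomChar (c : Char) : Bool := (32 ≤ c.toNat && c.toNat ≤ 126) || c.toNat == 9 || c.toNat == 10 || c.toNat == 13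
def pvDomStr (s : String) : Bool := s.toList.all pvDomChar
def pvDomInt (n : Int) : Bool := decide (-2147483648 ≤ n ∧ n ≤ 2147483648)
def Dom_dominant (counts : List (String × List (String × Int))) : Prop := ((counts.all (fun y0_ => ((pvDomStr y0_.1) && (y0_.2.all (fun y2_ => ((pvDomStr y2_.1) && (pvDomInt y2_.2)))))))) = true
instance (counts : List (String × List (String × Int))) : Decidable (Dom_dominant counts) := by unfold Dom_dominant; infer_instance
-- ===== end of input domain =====

-- B replaces A's per-axis sort with a single pass tracking the max value, its first key
-- and how many entries reach it (objective: alternative algorithm; not measurably faster).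

-- ===== PORT A =====
-- one loop iteration of A: sort the axis dict's items by value descending, then
-- take the head key if it is a strict maximum, else "mixed"
def dominantStepA (r : PySem.Dict String String) (p : String × List (String × Int)) :
    PySem.Dict String String :=
  let axis := p.1
  let d := p.2
  if d = [] then r.insert axis "mixed"
  else
    match PySem.List.sorted d (fun x => x.2) true with
    | [] => r   -- unreachable: sorted of a nonempty list is nonempty
    | [x] => r.insert axis x.1
    | x :: y :: _ => if x.2 > y.2 then r.insert axis x.1 else r.insert axis "mixed"

def dominant (counts : List (String × List (String × Int))) : List (String × String) :=
  (counts.foldl dominantStepA PySem.Dict.empty).items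

-- ===== PORT B =====
-- single pass over one axis dict: best = (first key with the max value, max value, #entries at it)
def bestStep (st : Option (String × Int × Nat)) (q : String × Int) :
    Option (String × Int × Nat) :=
  match st with
  | none => some (q.1, q.2, 1)
  | some (k, v, c) =>
      if q.2 > v then some (q.1, q.2, 1)
      else if q.2 = v then some (k, v, c + 1)
      else some (k, v, c)

def dominantStepB (r : PySem.Dict String String) (p : String × List (String × Int)) :
    PySem.Dict String String :=
  match p.2.foldl bestStep none with
  | some (k, _, c) => if c = 1 then r.insert p.1 k else r.insert p.1 "mixed"
  | none => r.insert p.1 "mixed"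

def dominant_alt (counts : List (String × List (String × Int))) : List (String × String) :=
  (counts.foldl dominantStepB PySem.Dict.empty).items

-- ===== PRECONDITION & SPEC =====
def Spec_dominant (counts : List (String × List (String × Int))) (out : List (String × String)) : Prop := out = dominant_alt counts
instance (counts : List (String × List (String × Int))) (out : List (String × String)) : Decidable (Spec_dominant counts out) := by unfold Spec_dominant; infer_instance

-- ===== CLAIM (what is proved, stated in full; the proofs are below) =====
def Claim_equal_dominant : Prop := ∀ (counts : List (String × List (String × Int))), Dom_dominant counts → Spec_dominant counts (dominant counts)

-- ===== LEMMAS AND PROOFS =====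

-- invariant of B's single pass over the processed prefix l
def GoodBest (l : List (String × Int)) : Option (String × Int × Nat) → Prop
  | none => l = []
  | some (k, v, c) =>
      (∃ p ∈ l, p.1 = k ∧ p.2 = v) ∧ (∀ p ∈ l, p.2 ≤ v) ∧
        c = l.countP (fun p => decide (p.2 = v))

theorem goodBest_step (l : List (String × Int)) (st : Option (String × Int × Nat))
    (q : String × Int) (h : GoodBest l st) : GoodBest (l ++ [q]) (bestStep st q) := by
  match st with
  | none =>
      simp only [GoodBest] at h
      subst h
      simp [bestStep, GoodBest]
  | some (k, v, c) =>
      obtain ⟨⟨p0, hp0, hp0k, hp0v⟩, hub, hc⟩ := h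
      simp only [bestStep]
      split_ifs with h1 h2
      · refine ⟨⟨q, by simp, rfl, rfl⟩, ?_, ?_⟩
        · intro p hp
          rcases List.mem_append.mp hp with hp | hp
          · exact le_of_lt (lt_of_le_of_lt (hub p hp) h1)
          · simp at hp; simp [hp]
        · rw [List.countP_append]
          have : l.countP (fun p => decide (p.2 = q.2)) = 0 := by
            rw [List.countP_eq_zero]
            intro p hp
            simp only [decide_eq_true_eq]
            exact ne_of_lt (lt_of_le_of_lt (hub p hp) h1)
          simp [this]
      · refine ⟨⟨p0, by simp [hp0], hp0k, hp0v⟩, ?_, ?_⟩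
        · intro p hp
          rcases List.mem_append.mp hp with hp | hp
          · exact hub p hp
          · simp at hp; simp [hp, h2]
        · rw [List.countP_append, ← hc]
          simp [h2]
      · refine ⟨⟨p0, by simp [hp0], hp0k, hp0v⟩, ?_, ?_⟩
        · intro p hp
          rcases List.mem_append.mp hp with hp | hp
          · exact hub p hp
          · simp at hp; simp [hp]; omega
        · rw [List.countP_append, ← hc]
          have : q.2 ≠ v := by omega
          simp [this]

theorem goodBest_fold (d : List (String × Int)) : GoodBest d (d.foldl bestStep none) := by
  induction d using List.reverseRecOn with
  | nil => simp [GoodBest]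
  | append_singleton l q ih =>
      rw [List.foldl_append]
      exact goodBest_step l _ q ih

-- two members satisfying a predicate that holds exactly once are equal
theorem eq_of_countP_eq_one {α : Type} (l : List α) (P : α → Bool)
    (h1 : l.countP P = 1) {a b : α} (ha : a ∈ l) (hb : b ∈ l)
    (hPa : P a) (hPb : P b) : a = b := by
  rw [List.countP_eq_length_filter] at h1
  obtain ⟨u, hu⟩ := List.length_eq_one_iff.mp h1
  have ha' : a ∈ l.filter P := List.mem_filter.mpr ⟨ha, hPa⟩
  have hb' : b ∈ l.filter P := List.mem_filter.mpr ⟨hb, hPb⟩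
  rw [hu] at ha' hb'
  simp at ha' hb'
  rw [ha', hb']

-- the per-axis strings of A and B coincide
theorem step_eq (r : PySem.Dict String String) (p : String × List (String × Int)) :
    dominantStepA r p = dominantStepB r p := by
  obtain ⟨axis, d⟩ := p
  by_cases hd : d = []
  · subst hd
    simp [dominantStepA, dominantStepB]
  · have hgood := goodBest_fold d
    have hperm : (PySem.List.sorted d (fun x => x.2) true).Perm d :=
      PySem.List.sorted_perm d (fun x => x.2) true
    have hpw := PySem.List.sorted_pairwise_rev (xs := d) (key := fun x : String × Int => x.2)
    match hb : d.foldl bestStep none with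
    | none =>
        rw [hb] at hgood
        exact absurd hgood hd
    | some (k, v, c) =>
        rw [hb] at hgood
        obtain ⟨⟨p0, hp0, hp0k, hp0v⟩, hub, hc⟩ := hgood
        match hs : PySem.List.sorted d (fun x => x.2) true with
        | [] =>
            rw [hs] at hperm
            exact absurd hperm.symm.eq_nil hd
        | [x] =>
            rw [hs] at hperm
            have hdx : d = [x] := (List.singleton_perm.mp hperm).symm
            subst hdx
            simp only [dominantStepA, dominantStepB, if_neg hd, hs]
            simp [List.foldl, bestStep]
        | x :: y :: t =>
            rw [hs] at hperm hpw
            -- v is the maximum value, and x.2 = v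
            have hxv : x.2 = v := by
              have h1 : x.2 ≤ v := hub x (hperm.mem_iff.mp (by simp))
              have h2 : p0.2 ≤ x.2 := by
                have := PySem.List.key_head_sorted_rev_ge d (fun x : String × Int => x.2) hs p0 hp0
                simpa using this
              omega
            have hyx : y.2 ≤ x.2 := by
              have h := hpw
              rw [List.pairwise_cons] at h
              simpa using h.1 y (by simp)
            have hcount : c = (x :: y :: t).countP (fun p => decide (p.2 = v)) := by
              rw [hc]
              exact (hperm.countP_eq _).symm
            simp only [dominantStepA, dominantStepB, if_neg hd, hs, hb]
            by_cases hxy : x.2 > y.2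
            · -- strict max: count is 1 and B's key is x's key
              have ht : ∀ b ∈ t, b.2 ≤ y.2 := by
                have h := hpw.tail
                simp only [List.tail_cons, List.pairwise_cons] at h
                intro b hbmem
                simpa using h.1 b hbmem
              have hc1 : c = 1 := by
                rw [hcount]
                simp only [List.countP_cons]
                have h1 : decide (x.2 = v) = true := by simp [hxv]
                have h2 : decide (y.2 = v) = true → False := by
                  simp only [decide_eq_true_eq]; omega
                have h3 : t.countP (fun p => decide (p.2 = v)) = 0 := by
                  rw [List.countP_eq_zero]
                  intro b hbmem
                  simp only [decide_eq_true_eq]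
                  have := ht b hbmem
                  omega
                rw [h3]
                simp only [h1, if_pos]
                cases hdec : decide (y.2 = v) with
                | true => exact absurd (h2 hdec) id
                | false => simp
              have hx_mem : x ∈ d := hperm.mem_iff.mp (by simp)
              have hkx : p0 = x := by
                refine eq_of_countP_eq_one d (fun p => decide (p.2 = v)) ?_ hp0 hx_mem ?_ ?_
                · rw [← hc, hc1]
                · simp [hp0v]
                · simp [hxv]
              rw [if_pos hxy, if_pos hc1, ← hp0k, hkx]
            · -- tie at the top: count ≥ 2 on both sides
              have hyv : y.2 = v := by omega
              have hc2 : c ≠ 1 := by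
                rw [hcount]
                simp only [List.countP_cons]
                have h1 : decide (x.2 = v) = true := by simp [hxv]
                have h2 : decide (y.2 = v) = true := by simp [hyv]
                rw [h1, h2]
                simp
              rw [if_neg hxy, if_neg hc2]

-- ===== VERDICT (by name: the statement is the Claim_ definition above) =====
theorem dominant_spec : Claim_equal_dominant := by
  intro counts _
  unfold Spec_dominant dominant dominant_alt
  have h : dominantStepA = dominantStepB := funext fun r => funext (step_eq r)
  rw [h]
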